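-- pv_equiv track=rewrite | github.com/htang7415/Code-Lab | modules/ai-agents/tool-use/tool-schema-matching/python/tool_schema_matching.py | best_schema_match
-- ===== SOURCE A (Python) =====
-- def schema_fields(schema: dict[str, object]) -> list[str]:
--     properties = schema.get("properties", {})
--     if not isinstance(properties, dict):
--         return []
--     fields: list[str] = []
--     for key in properties:
--         cleaned = str(key).strip()
--         if cleaned:
--             fields.append(cleaned)
--     return fields
--
-- def schema_match_score(argument_names: list[str], field_names: list[str]) -> int:
--     wanted = {name.strip() for name in argument_names if name.strip()}
--     available = {name.strip() for name in field_names if name.strip()}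
--     return len(wanted & available)
--
-- def best_schema_match(argument_names: list[str], tool_schemas: dict[str, dict[str, object]]) -> str | None:
--     best_tool: str | None = None
--     best_score = 0
--     for tool_name, schema in tool_schemas.items():
--         score = schema_match_score(argument_names, schema_fields(schema))
--         if score > best_score:
--             best_tool = tool_name
--             best_score = score
--     return best_tool
-- ===== SOURCE B (Python) =====
-- def best_schema_match(argument_names, tool_schemas):
--     # Deduplicated list of cleaned wanted names (computed once, not per tool).
--     wanted = []
--     seen = set()
--     for name in argument_names:
--         c = name.strip()
--         if c and c not in seen:
--             seen.add(c)
--             wanted.append(c)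
--     # Score every tool in one pass, keeping (tool, score) pairs.
--     scores = []
--     for tool_name, schema in tool_schemas.items():
--         props = schema.get("properties", {})
--         fields = set()
--         if isinstance(props, dict):
--             for key in props:
--                 c = str(key).strip()
--                 if c:
--                     fields.add(c)
--         scores.append((tool_name, sum(1 for w in wanted if w in fields)))
--     # Pick the maximum score, then the first tool achieving it; 0 means no match.
--     best = 0
--     for _, s in scores:
--         best = max(best, s)
--     if best <= 0:
--         return None
--     return next(t for t, s in scores if s == best)
-- ===== Notes on version B (the rewrite author's own statement) =====
-- stated objective: faster
-- what changed: B builds the cleaned deduplicated wanted set once and scores every tool into an explicit (tool, score) list by counting memberships, instead of A's rebuilding the wanted set and intersecting two fresh sets for every tool; the winner is then picked as the maximum score followed by the first tool attaining it, instead of A's running strict-greater best.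
import Mathlib
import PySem

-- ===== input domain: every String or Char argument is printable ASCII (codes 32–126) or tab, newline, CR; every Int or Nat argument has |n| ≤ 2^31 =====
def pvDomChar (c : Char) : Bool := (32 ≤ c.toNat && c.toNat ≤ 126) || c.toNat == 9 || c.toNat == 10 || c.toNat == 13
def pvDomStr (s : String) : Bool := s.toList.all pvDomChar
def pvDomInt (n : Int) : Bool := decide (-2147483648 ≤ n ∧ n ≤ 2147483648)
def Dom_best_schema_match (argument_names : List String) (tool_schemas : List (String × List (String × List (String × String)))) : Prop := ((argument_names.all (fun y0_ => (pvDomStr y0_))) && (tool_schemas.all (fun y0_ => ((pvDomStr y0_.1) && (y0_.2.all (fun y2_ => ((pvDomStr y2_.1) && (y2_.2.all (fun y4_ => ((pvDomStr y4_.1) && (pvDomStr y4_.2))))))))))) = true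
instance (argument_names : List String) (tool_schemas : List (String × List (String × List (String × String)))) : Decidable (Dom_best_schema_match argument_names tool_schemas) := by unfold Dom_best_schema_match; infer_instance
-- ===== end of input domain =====

-- B computes the cleaned wanted set once and scores all tools into a list, then picks the
-- maximum and the first tool attaining it, instead of A's per-tool set rebuild + running best.

-- ===== PORT A =====
def schema_fields (schema : List (String × List (String × String))) : List String :=
  let properties := PySem.Dict.getD (PySem.Dict.mk schema) "properties" []
  -- under this typing 'properties' is always a dict, so 'if not isinstance(...): return []' never fires
  properties.foldl (fun fields kv =>
    let cleaned := PySem.Str.strip kv.1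
    if cleaned ≠ "" then fields ++ [cleaned] else fields) []

def schema_match_score (argument_names : List String) (field_names : List String) : Int :=
  let wanted : PySem.Set String := PySem.Set.ofList (argument_names.filterMap (fun n =>
    let c := PySem.Str.strip n
    if c ≠ "" then some c else none))
  let available : PySem.Set String := PySem.Set.ofList (field_names.filterMap (fun n =>
    let c := PySem.Str.strip n
    if c ≠ "" then some c else none))
  ((PySem.Set.inter wanted available).length : Int)

def best_schema_match (argument_names : List String) (tool_schemas : List (String × List (String × List (String × String)))) : Option String :=
  (tool_schemas.foldl (fun (acc : Option String × Int) ts =>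
    let score := schema_match_score argument_names (schema_fields ts.2)
    if score > acc.2 then (some ts.1, score) else acc) (none, 0)).1

-- ===== PORT B =====
-- Source B's ordered 'wanted' list together with its mirror set 'seen' IS one PySem.Set
-- (distinct elements in first-insertion order), built by the same loop.
def altWanted (argument_names : List String) : PySem.Set String :=
  argument_names.foldl (fun s n =>
    let c := PySem.Str.strip n
    if c ≠ "" then PySem.Set.add s c else s) PySem.Set.empty

def altFields (props : List (String × String)) : PySem.Set String :=
  props.foldl (fun s kv =>
    let c := PySem.Str.strip kv.1
    if c ≠ "" then PySem.Set.add s c else s) PySem.Set.empty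

-- the (tool, score) list; 'sum(1 for w in wanted if w in fields)' is countP (a 0/1 generator sum)
def altScores (wanted : PySem.Set String) (tool_schemas : List (String × List (String × List (String × String)))) : List (String × Int) :=
  tool_schemas.map (fun ts =>
    let fields := altFields (PySem.Dict.getD (PySem.Dict.mk ts.2) "properties" [])
    (ts.1, (wanted.countP (fun w => PySem.Set.contains fields w) : Int)))

def best_schema_match_alt (argument_names : List String) (tool_schemas : List (String × List (String × List (String × String)))) : Option String :=
  let scores := altScores (altWanted argument_names) tool_schemas
  let best : Int := scores.foldl (fun b ts => max b ts.2) 0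
  if best ≤ 0 then none
  else
    -- next(t for t, s in scores if s == best): when best > 0 some tool attains it, so find? succeeds
    (scores.find? (fun ts => ts.2 == best)).map Prod.fst

-- ===== PRECONDITION & SPEC =====
def Spec_best_schema_match (argument_names : List String) (tool_schemas : List (String × List (String × List (String × String)))) (out : Option String) : Prop := out = best_schema_match_alt argument_names tool_schemas
instance (argument_names : List String) (tool_schemas : List (String × List (String × List (String × String)))) (out : Option String) : Decidable (Spec_best_schema_match argument_names tool_schemas out) := by unfold Spec_best_schema_match; infer_instance

-- ===== CLAIM (what is proved, stated in full; the proofs are below) =====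
def Claim_equal_best_schema_match : Prop := ∀ (argument_names : List String) (tool_schemas : List (String × List (String × List (String × String)))), Dom_best_schema_match argument_names tool_schemas → Spec_best_schema_match argument_names tool_schemas (best_schema_match argument_names tool_schemas)

-- ===== LEMMAS AND PROOFS =====

-- the shared "clean" step: strip, keep if nonempty
def pvClean (n : String) : Option String :=
  let c := PySem.Str.strip n
  if c ≠ "" then some c else none

theorem pv_dropWhile_head_false {α : Type} (p : α → Bool) (l : List α) :
    ∀ (a : α) (as : List α), List.dropWhile p l = a :: as → p a = false := by
  induction l with
  | nil => intro a as h; simp [List.dropWhile] at h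
  | cons x t ih =>
    intro a as h
    by_cases hp : p x
    · rw [List.dropWhile_cons] at h
      simp only [hp, ite_true] at h
      exact ih a as h
    · rw [List.dropWhile_cons] at h
      simp only [hp] at h
      cases h
      simpa using hp

theorem pv_dropWhile_rdropWhile_dropWhile {α : Type} (p : α → Bool) (l : List α) :
    List.dropWhile p (List.rdropWhile p (List.dropWhile p l)) = List.rdropWhile p (List.dropWhile p l) := by
  obtain ⟨s, hs⟩ := List.rdropWhile_prefix p (List.dropWhile p l)
  have key : ∀ (x : List α), (∀ a, x[0]? = some a → p a = false) → List.dropWhile p x = x := by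
    intro x hx
    cases x with
    | nil => rfl
    | cons a as =>
      rw [List.dropWhile_cons]
      simp [hx a (by simp)]
  apply key
  intro a ha
  rcases hrd : List.rdropWhile p (List.dropWhile p l) with _ | ⟨b, bs⟩
  · rw [hrd] at ha; simp at ha
  · rw [hrd] at ha
    simp only [List.getElem?_cons_zero, Option.some.injEq] at ha
    rw [hrd] at hs
    have hx : List.dropWhile p l = b :: (bs ++ s) := by rw [← hs]; simp
    have hb := pv_dropWhile_head_false p l b (bs ++ s) hx
    rw [← ha]
    exact hb

theorem pv_chars_strip_strip (l : List Char) :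
    PySem.Chars.strip (PySem.Chars.strip l) = PySem.Chars.strip l := by
  have hr : ∀ x : List Char, PySem.Chars.rstrip x = List.rdropWhile PySem.Chars.isspace x := fun _ => rfl
  simp only [PySem.Chars.strip, PySem.Chars.lstrip, hr]
  rw [pv_dropWhile_rdropWhile_dropWhile, List.rdropWhile_idempotent]

theorem pv_str_strip_strip (s : String) :
    PySem.Str.strip (PySem.Str.strip s) = PySem.Str.strip s := by
  simp [PySem.Str.strip, pv_chars_strip_strip]

-- Source B's guarded add-loops, rewritten through Option.elim, are Set.add folded over the cleaned list
theorem pv_foldl_clean_add {α : Type} (g : α → Option String) (xs : List α) (s : PySem.Set String) :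
    xs.foldl (fun s x => (g x).elim s (fun c => PySem.Set.add s c)) s
    = (xs.filterMap g).foldl PySem.Set.add s := by
  induction xs generalizing s with
  | nil => rfl
  | cons h t ih => cases hg : g h <;> simp [hg, ih]

theorem pv_foldl_append_clean {α : Type} (g : α → Option String) (xs : List α) (acc : List String) :
    xs.foldl (fun fields x => (g x).elim fields (fun c => fields ++ [c])) acc
    = acc ++ xs.filterMap g := by
  induction xs generalizing acc with
  | nil => simp
  | cons h t ih => cases hg : g h <;> simp [hg, ih]

theorem pv_wanted_lam :
    (fun (s : PySem.Set String) (n : String) =>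
      let c := PySem.Str.strip n
      if c ≠ "" then PySem.Set.add s c else s)
    = fun s n => (pvClean n).elim s (fun c => PySem.Set.add s c) := by
  funext s n
  simp only [pvClean]
  by_cases hc : PySem.Str.strip n = "" <;> simp [hc]

theorem pv_fields_lam :
    (fun (s : PySem.Set String) (kv : String × String) =>
      let c := PySem.Str.strip kv.1
      if c ≠ "" then PySem.Set.add s c else s)
    = fun s kv => (pvClean kv.1).elim s (fun c => PySem.Set.add s c) := by
  funext s kv
  simp only [pvClean]
  by_cases hc : PySem.Str.strip kv.1 = "" <;> simp [hc]

theorem pv_afields_lam :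
    (fun (fields : List String) (kv : String × String) =>
      let cleaned := PySem.Str.strip kv.1
      if cleaned ≠ "" then fields ++ [cleaned] else fields)
    = fun fields kv => (pvClean kv.1).elim fields (fun c => fields ++ [c]) := by
  funext fields kv
  simp only [pvClean]
  by_cases hc : PySem.Str.strip kv.1 = "" <;> simp [hc]

theorem pv_schema_fields_eq (schema : List (String × List (String × String))) :
    schema_fields schema
    = (PySem.Dict.getD (PySem.Dict.mk schema) "properties" []).filterMap (fun kv => pvClean kv.1) := by
  have h : schema_fields schema
      = (PySem.Dict.getD (PySem.Dict.mk schema) "properties" []).foldl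
          (fun fields kv =>
            let cleaned := PySem.Str.strip kv.1
            if cleaned ≠ "" then fields ++ [cleaned] else fields) [] := rfl
  rw [h, pv_afields_lam, pv_foldl_append_clean, List.nil_append]

-- every cleaned name is a fixed point of the clean step
theorem pv_clean_mem_fix {α : Type} (g : α → String) (l : List α) :
    ∀ x ∈ l.filterMap (fun v => pvClean (g v)), pvClean x = some x := by
  intro x hx
  obtain ⟨v, -, hv⟩ := List.mem_filterMap.mp hx
  by_cases hc : PySem.Str.strip (g v) = ""
  · simp [pvClean, hc] at hv
  · simp only [pvClean, hc, ne_eq, not_false_iff, ite_true, Option.some.injEq] at hv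
    subst hv
    simp [pvClean, pv_str_strip_strip, hc]

theorem pv_filterMap_clean_self (l : List String) (h : ∀ x ∈ l, pvClean x = some x) :
    l.filterMap pvClean = l := by
  induction l with
  | nil => rfl
  | cons a t ih =>
    simp only [List.filterMap_cons, h a (List.mem_cons_self)]
    rw [ih (fun x hx => h x (List.mem_cons_of_mem _ hx))]

-- A's per-tool score equals B's countP over the shared wanted set
theorem pv_score_eq (argument_names : List String) (schema : List (String × List (String × String))) :
    schema_match_score argument_names (schema_fields schema)
    = ((altWanted argument_names).countP
        (fun w => PySem.Set.contains (altFields (PySem.Dict.getD (PySem.Dict.mk schema) "properties" [])) w) : Int) := by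
  have hw : altWanted argument_names = PySem.Set.ofList (argument_names.filterMap pvClean) := by
    unfold altWanted
    rw [pv_wanted_lam, PySem.Set.ofList_eq_foldl]
    exact pv_foldl_clean_add pvClean argument_names PySem.Set.empty
  have hfields : altFields (PySem.Dict.getD (PySem.Dict.mk schema) "properties" [])
      = PySem.Set.ofList (schema_fields schema) := by
    unfold altFields
    rw [pv_fields_lam, PySem.Set.ofList_eq_foldl, pv_schema_fields_eq]
    exact pv_foldl_clean_add (fun kv : String × String => pvClean kv.1) _ PySem.Set.empty
  have havail : (schema_fields schema).filterMap pvClean = schema_fields schema :=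
    pv_filterMap_clean_self _ (by
      rw [pv_schema_fields_eq]
      exact pv_clean_mem_fix (fun kv : String × String => kv.1) _)
  have hlam : (fun n : String =>
      let c := PySem.Str.strip n
      if c ≠ "" then some c else none) = pvClean := rfl
  simp only [schema_match_score, hlam]
  rw [havail, hw, hfields]
  have hinter : PySem.Set.inter (PySem.Set.ofList (argument_names.filterMap pvClean))
        (PySem.Set.ofList (schema_fields schema))
      = (PySem.Set.ofList (argument_names.filterMap pvClean)).filter
          (fun x => PySem.Set.contains (PySem.Set.ofList (schema_fields schema)) x) := rfl
  rw [hinter, ← List.countP_eq_length_filter]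

-- running best (strict >, init (o, b)) = max-then-first-hit
def pvStep (acc : Option String × Int) (ts : String × Int) : Option String × Int :=
  if ts.2 > acc.2 then (some ts.1, ts.2) else acc

def pvMax (l : List (String × Int)) (b : Int) : Int :=
  l.foldl (fun m ts => max m ts.2) b

theorem pv_le_pvMax (l : List (String × Int)) (b : Int) : b ≤ pvMax l b := by
  induction l generalizing b with
  | nil => exact le_refl b
  | cons h t ih => exact le_trans (le_max_left b h.2) (ih (max b h.2))

theorem pv_sel_fst (l : List (String × Int)) (o : Option String) (b : Int) :
    (l.foldl pvStep (o, b)).1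
    = if pvMax l b ≤ b then o
      else (l.find? (fun ts => ts.2 == pvMax l b)).map Prod.fst := by
  induction l generalizing o b with
  | nil => simp [pvMax]
  | cons hd t ih =>
    simp only [List.foldl_cons]
    by_cases hgt : hd.2 > b
    · have hstep : pvStep (o, b) hd = (some hd.1, hd.2) := by simp [pvStep, hgt]
      have hmax : pvMax (hd :: t) b = pvMax t hd.2 := by
        simp [pvMax, max_eq_right (le_of_lt hgt)]
      rw [hstep, ih, hmax]
      have hm := pv_le_pvMax t hd.2
      by_cases hle : pvMax t hd.2 ≤ hd.2
      · have heq : pvMax t hd.2 = hd.2 := le_antisymm hle hm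
        have hnb : ¬ pvMax t hd.2 ≤ b := by omega
        have hnb' : ¬ hd.2 ≤ b := by omega
        simp [hnb', heq]
      · have hnb : ¬ pvMax t hd.2 ≤ b := by omega
        have hne : (hd.2 == pvMax t hd.2) = false := by
          simp only [beq_eq_false_iff_ne, ne_eq]
          omega
        simp [hle, hnb, hne]
    · have hstep : pvStep (o, b) hd = (o, b) := by simp [pvStep, hgt]
      have hmax : pvMax (hd :: t) b = pvMax t b := by
        simp [pvMax, max_eq_left (by omega : hd.2 ≤ b)]
      rw [hstep, ih, hmax]
      by_cases hle : pvMax t b ≤ b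
      · simp [hle]
      · have hne : (hd.2 == pvMax t b) = false := by
          simp only [beq_eq_false_iff_ne, ne_eq]
          omega
        simp [hle, hne]

-- ===== VERDICT (by name: the statement is the Claim_ definition above) =====
theorem best_schema_match_spec : Claim_equal_best_schema_match := by
  intro argument_names tool_schemas _
  unfold Spec_best_schema_match best_schema_match best_schema_match_alt
  have hA : (tool_schemas.foldl (fun (acc : Option String × Int) ts =>
      let score := schema_match_score argument_names (schema_fields ts.2)
      if score > acc.2 then (some ts.1, score) else acc) (none, 0))
      = (altScores (altWanted argument_names) tool_schemas).foldl pvStep (none, 0) := by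
    unfold altScores
    rw [List.foldl_map]
    congr 1
    funext acc ts
    simp only [pvStep, pv_score_eq]
  rw [hA, pv_sel_fst]
  rfl
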